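-- pv_equiv track=rewrite | github.com/nfnmod/SCADA-Intrusion-Detection | .github/IDS/run.py | LSTM_preds_to_window_preds
-- ===== SOURCE A (Python) =====
-- def LSTM_preds_to_window_preds(model_detections, true_labels, window_size, count_threshold):
--     model_windows_labels = []
--     true_windows_labels = []
--     length = len(true_labels)  # true labels is labels of PACKETS (injected / benign).
--     for i in range(length - window_size + 1):
--         true_window_label = max(true_labels[i: i + window_size])
--         if i < 21:
--             # there are missing detections for part of the window. consider only labels for the packets
--             # for which there are detections.
--             # take labels for packets: i...i+window-1 = predictions from 0...i+window-1-21.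
--             # the jth prediction is for the j+21 packet (j >= 1)
--             model_window_label = 1 if sum(model_detections[:i + window_size - 21]) > count_threshold else 0
--         else:
--             # take labels for packets: i-21...min(i+window-1-21, |detections|).
--             # use min to avoid out of boundary exception.
--             model_window_label = 1 if sum(
--                 model_detections[i - 21: min(i + window_size - 21, len(model_detections))]) > count_threshold else 0
--         true_windows_labels.append(true_window_label)
--         model_windows_labels.append(model_window_label)
--
--     return true_windows_labels, model_windows_labels
-- ===== SOURCE B (Python) =====
-- def LSTM_preds_to_window_preds(model_detections, true_labels, window_size, count_threshold):
--     n = len(true_labels)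
--     m = len(model_detections)
--     w = window_size
--     num = n - w + 1
--     if num <= 0:
--         return [], []
--     # per-block running maxima (block size w): pre[j] = max(labels[block_start(j)..j])
--     pre = []
--     cur = 0
--     for j in range(n):
--         cur = true_labels[j] if j % w == 0 else max(cur, true_labels[j])
--         pre.append(cur)
--     # suf[j] = max(labels[j..block_end(j)]) (clamped at n-1), built back-to-front
--     suf = []
--     cur = 0
--     for j in range(n - 1, -1, -1):
--         cur = true_labels[j] if ((j + 1) % w == 0 or j == n - 1) else max(cur, true_labels[j])
--         suf.append(cur)
--     suf.reverse()
--     # window max spans at most two blocks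
--     true_out = [max(suf[i], pre[i + w - 1]) for i in range(num)]
--     # prefix sums of detections
--     P = [0]
--     s = 0
--     for d in model_detections:
--         s += d
--         P.append(s)
--     def clamp(t):  # normalize a Python slice stop index to [0, m]
--         if t < 0:
--             t += m
--         return 0 if t < 0 else (m if t > m else t)
--     model_out = []
--     for i in range(num):
--         if i < 21:
--             lo, hi = 0, clamp(i + w - 21)
--         else:
--             lo, hi = min(i - 21, m), min(i + w - 21, m)
--         model_out.append(1 if P[hi] - P[lo] > count_threshold else 0)
--     return true_out, model_out
-- ===== Notes on version B (the rewrite author's own statement) =====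
-- stated objective: faster
-- what changed: Replaces the per-window max-of-slice and sum-of-slice (O(n*w)) by a per-block prefix/suffix running-maximum decomposition for the window maxima and a single prefix-sum array for the detection window sums, all in O(n+m).
import Mathlib
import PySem

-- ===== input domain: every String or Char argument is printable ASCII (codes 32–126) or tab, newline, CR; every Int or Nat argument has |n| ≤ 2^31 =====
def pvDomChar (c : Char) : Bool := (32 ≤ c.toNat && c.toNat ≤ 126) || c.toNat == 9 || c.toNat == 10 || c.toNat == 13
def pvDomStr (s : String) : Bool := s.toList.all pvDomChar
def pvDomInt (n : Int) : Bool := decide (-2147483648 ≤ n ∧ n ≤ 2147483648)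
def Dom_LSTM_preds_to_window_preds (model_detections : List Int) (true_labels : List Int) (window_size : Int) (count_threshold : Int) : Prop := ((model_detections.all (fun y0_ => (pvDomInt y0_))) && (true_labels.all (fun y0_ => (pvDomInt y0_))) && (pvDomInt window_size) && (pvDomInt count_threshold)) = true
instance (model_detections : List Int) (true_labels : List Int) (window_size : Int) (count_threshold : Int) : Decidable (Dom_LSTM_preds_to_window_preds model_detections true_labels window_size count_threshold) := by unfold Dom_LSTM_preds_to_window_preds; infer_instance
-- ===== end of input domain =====

-- B replaces A's per-window max-of-slice and sum-of-slice by a per-block prefix/suffix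
-- running-maximum decomposition plus one prefix-sum array (objective: faster).

-- ===== PORT A =====
def LSTM_preds_to_window_preds (model_detections : List Int) (true_labels : List Int) (window_size : Int) (count_threshold : Int) : List Int × List Int :=
  let length : Int := true_labels.length
  (PySem.List.pyRange 0 (length - window_size + 1) 1).foldl
    (fun (acc : List Int × List Int) i =>
      let true_window_label : Int :=
        match PySem.List.max? (PySem.List.slice true_labels (some i) (some (i + window_size))) (fun y => y) with
        | some v => v
        | none => 0   -- Python's max([]) raises ValueError; excluded by Pre_
      let model_window_label : Int :=
        if i < 21 then
          if (PySem.List.slice model_detections none (some (i + window_size - 21))).sum > count_threshold then 1 else 0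
        else
          if (PySem.List.slice model_detections (some (i - 21)) (some (min (i + window_size - 21) (model_detections.length : Int)))).sum > count_threshold then 1 else 0
      (acc.1 ++ [true_window_label], acc.2 ++ [model_window_label]))
    ([], [])

-- ===== PORT B =====
def LSTM_preds_to_window_preds_alt (model_detections : List Int) (true_labels : List Int) (window_size : Int) (count_threshold : Int) : List Int × List Int :=
  let n : Int := true_labels.length
  let m : Int := model_detections.length
  let w : Int := window_size
  let num : Int := n - w + 1
  if num ≤ 0 then ([], [])
  else
    -- per-block running maxima: pre[j] = max(labels[block_start(j)..j])
    let pre : List Int := ((PySem.List.pyRange 0 n 1).foldl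
      (fun (acc : List Int × Int) j =>
        let cur : Int := if PySem.Int.mod j w = 0 then PySem.List.pyGetD true_labels j 0
                         else max acc.2 (PySem.List.pyGetD true_labels j 0)
        (acc.1 ++ [cur], cur)) ([], 0)).1
    -- suf[j] = max(labels[j..block_end(j)]), built back-to-front then reversed
    let suf : List Int := (((PySem.List.pyRange (n - 1) (-1) (-1)).foldl
      (fun (acc : List Int × Int) j =>
        let cur : Int := if PySem.Int.mod (j + 1) w = 0 ∨ j = n - 1 then PySem.List.pyGetD true_labels j 0
                         else max acc.2 (PySem.List.pyGetD true_labels j 0)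
        (acc.1 ++ [cur], cur)) ([], 0)).1).reverse
    let true_out : List Int := (PySem.List.pyRange 0 num 1).map
      (fun i => max (PySem.List.pyGetD suf i 0) (PySem.List.pyGetD pre (i + w - 1) 0))
    -- prefix sums of detections
    let P : List Int := (model_detections.foldl
      (fun (acc : List Int × Int) d => (acc.1 ++ [acc.2 + d], acc.2 + d)) ([0], 0)).1
    let clamp : Int → Int := fun t =>
      let t' := if t < 0 then t + m else t
      if t' < 0 then 0 else if t' > m then m else t'
    let model_out : List Int := (PySem.List.pyRange 0 num 1).map
      (fun i =>
        let lohi : Int × Int := if i < 21 then ((0 : Int), clamp (i + w - 21))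
                                else (min (i - 21) m, min (i + w - 21) m)
        if PySem.List.pyGetD P lohi.2 0 - PySem.List.pyGetD P lohi.1 0 > count_threshold then 1 else 0)
    (true_out, model_out)

-- ===== PRECONDITION & SPEC =====
-- Pre_ excludes exactly the inputs where A raises: window_size ≤ 0 makes the first
-- window slice empty and Python's max([]) raise ValueError.
def Pre_LSTM_preds_to_window_preds (model_detections : List Int) (true_labels : List Int) (window_size : Int) (count_threshold : Int) : Prop := 1 ≤ window_size
instance (model_detections : List Int) (true_labels : List Int) (window_size : Int) (count_threshold : Int) : Decidable (Pre_LSTM_preds_to_window_preds model_detections true_labels window_size count_threshold) := by unfold Pre_LSTM_preds_to_window_preds; infer_instance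
def pvWitness_LSTM_preds_to_window_preds : List Int × List Int × Int × Int := ([1, 0], [0, 1, 1], 2, 0)

def Spec_LSTM_preds_to_window_preds (model_detections : List Int) (true_labels : List Int) (window_size : Int) (count_threshold : Int) (out : List Int × List Int) : Prop := out = LSTM_preds_to_window_preds_alt model_detections true_labels window_size count_threshold
instance (model_detections : List Int) (true_labels : List Int) (window_size : Int) (count_threshold : Int) (out : List Int × List Int) : Decidable (Spec_LSTM_preds_to_window_preds model_detections true_labels window_size count_threshold out) := by unfold Spec_LSTM_preds_to_window_preds; infer_instance

-- ===== CLAIM (what is proved, stated in full; the proofs are below) =====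
def Claim_equal_LSTM_preds_to_window_preds : Prop := ∀ (model_detections : List Int) (true_labels : List Int) (window_size : Int) (count_threshold : Int), Dom_LSTM_preds_to_window_preds model_detections true_labels window_size count_threshold → Pre_LSTM_preds_to_window_preds model_detections true_labels window_size count_threshold → Spec_LSTM_preds_to_window_preds model_detections true_labels window_size count_threshold (LSTM_preds_to_window_preds model_detections true_labels window_size count_threshold)

-- ===== LEMMAS AND PROOFS =====

def pvMaxSeg (tl : List Int) (a b : Nat) (v : Int) : Prop :=
  (∃ k, a ≤ k ∧ k ≤ b ∧ k < tl.length ∧ v = tl.getD k 0) ∧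
  (∀ k, a ≤ k → k ≤ b → k < tl.length → tl.getD k 0 ≤ v)

theorem pvMaxSeg_unique {tl : List Int} {a b : Nat} {v1 v2 : Int}
    (h1 : pvMaxSeg tl a b v1) (h2 : pvMaxSeg tl a b v2) : v1 = v2 := by
  obtain ⟨⟨k1, hk1a, hk1b, hk1n, he1⟩, hub1⟩ := h1
  obtain ⟨⟨k2, hk2a, hk2b, hk2n, he2⟩, hub2⟩ := h2
  have := hub2 k1 hk1a hk1b hk1n
  have := hub1 k2 hk2a hk2b hk2n
  omega

theorem pv_mem_drop_take {tl : List Int} {a m : Nat} {y : Int} :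
    y ∈ (tl.drop a).take m ↔ ∃ k, a ≤ k ∧ k < a + m ∧ k < tl.length ∧ y = tl.getD k 0 := by
  constructor
  · intro hy
    obtain ⟨j, hj, he⟩ := List.mem_iff_getElem.1 hy
    have hj' : j < m ∧ a + j < tl.length := by
      simp [List.length_take, List.length_drop] at hj; omega
    refine ⟨a + j, by omega, by omega, hj'.2, ?_⟩
    rw [List.getD_eq_getElem _ _ hj'.2, ← he]
    simp [List.getElem_take, List.getElem_drop]
  · rintro ⟨k, hka, hkm, hkn, rfl⟩
    rw [List.getD_eq_getElem _ _ hkn]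
    apply List.mem_iff_getElem.2
    refine ⟨k - a, by simp [List.length_take, List.length_drop]; omega, ?_⟩
    simp [List.getElem_take, List.getElem_drop]
    congr 1; omega

theorem pv_max_char (L : List Int) (hL : L ≠ []) :
    ∃ v, PySem.List.max? L (fun y => y) = some v ∧ v ∈ L ∧ ∀ y ∈ L, y ≤ v := by
  obtain ⟨v, hv⟩ : ∃ v, PySem.List.max? L (fun y => y) = some v := by
    cases h : PySem.List.max? L (fun y => y) with
    | none => exact absurd ((PySem.List.max?_eq_none_iff L (fun y => y)).1 h) hL
    | some v => exact ⟨v, rfl⟩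
  exact ⟨v, hv, PySem.List.max?_mem hv, fun y hy => PySem.List.max?_isMax hv y hy⟩

theorem pv_mod_succ {wn j : Nat} (hw : 1 ≤ wn) (h : (j + 1) % wn ≠ 0) :
    (j + 1) % wn = j % wn + 1 := by
  have hr : j % wn < wn := Nat.mod_lt _ (by omega)
  have hd := Nat.div_add_mod j wn
  rcases Nat.lt_or_ge (j % wn + 1) wn with hlt | hge
  · have : j + 1 = wn * (j / wn) + (j % wn + 1) := by omega
    rw [this, Nat.mul_add_mod, Nat.mod_eq_of_lt hlt]
  · exfalso
    apply h
    have he : j + 1 = wn * (j / wn + 1) := by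
      have : wn * (j / wn + 1) = wn * (j / wn) + wn := by ring
      omega
    rw [he, Nat.mul_mod_right]

theorem pv_mod_succ_zero {wn j : Nat} (hw : 1 ≤ wn) (h : (j + 1) % wn = 0) :
    j % wn = wn - 1 := by
  have hr : j % wn < wn := Nat.mod_lt _ (by omega)
  by_contra hne
  have hd := Nat.div_add_mod j wn
  have h1 : j + 1 = wn * (j / wn) + (j % wn + 1) := by omega
  rw [h1, Nat.mul_add_mod, Nat.mod_eq_of_lt (by omega)] at h
  omega

theorem pvMaxSeg_snoc {tl : List Int} {a j : Nat} {v : Int}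
    (h : pvMaxSeg tl a j v) (hj : j + 1 < tl.length) :
    pvMaxSeg tl a (j + 1) (max v (tl.getD (j + 1) 0)) := by
  obtain ⟨⟨k, hka, hkb, hkn, he⟩, hub⟩ := h
  constructor
  · rcases max_choice v (tl.getD (j + 1) 0) with hm | hm
    · exact ⟨k, hka, by omega, hkn, by omega⟩
    · exact ⟨j + 1, by omega, le_refl _, hj, hm⟩
  · intro k' hk'a hk'b hk'n
    rcases Nat.lt_or_ge k' (j + 1) with hlt | hge
    · exact le_trans (hub k' hk'a (by omega) hk'n) (le_max_left _ _)
    · have : k' = j + 1 := by omega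
      subst this; exact le_max_right _ _

theorem pvMaxSeg_cons {tl : List Int} {j b : Nat} {v : Int}
    (h : pvMaxSeg tl (j + 1) b v) (hj : j < tl.length) (hjb : j + 1 ≤ b) :
    pvMaxSeg tl j b (max v (tl.getD j 0)) := by
  obtain ⟨⟨k, hka, hkb, hkn, he⟩, hub⟩ := h
  constructor
  · rcases max_choice v (tl.getD j 0) with hm | hm
    · exact ⟨k, by omega, hkb, hkn, by omega⟩
    · exact ⟨j, le_refl _, by omega, hj, hm⟩
  · intro k' hk'a hk'b hk'n
    rcases Nat.lt_or_ge k' (j + 1) with hlt | hge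
    · have : k' = j := by omega
      subst this; exact le_max_right _ _
    · exact le_trans (hub k' hge hk'b hk'n) (le_max_left _ _)

def pvFpre (tl : List Int) (wn : Nat) : Nat → Int
  | 0 => tl.getD 0 0
  | j + 1 => if (j + 1) % wn = 0 then tl.getD (j + 1) 0
             else max (pvFpre tl wn j) (tl.getD (j + 1) 0)

theorem pvMaxSeg_single {tl : List Int} {j : Nat} (hj : j < tl.length) :
    pvMaxSeg tl j j (tl.getD j 0) := by
  refine ⟨⟨j, le_refl _, le_refl _, hj, rfl⟩, ?_⟩
  intro k hka hkb _
  have : k = j := by omega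
  subst this; exact le_refl _

theorem pvFpre_spec (tl : List Int) (wn : Nat) (hw : 1 ≤ wn) :
    ∀ j, j < tl.length → pvMaxSeg tl (j - j % wn) j (pvFpre tl wn j) := by
  intro j
  induction j with
  | zero => intro hj; simpa using pvMaxSeg_single hj
  | succ j ih =>
    intro hj
    by_cases h0 : (j + 1) % wn = 0
    · simp only [pvFpre, h0, if_true]
      simpa using pvMaxSeg_single hj
    · have hm := pv_mod_succ hw h0
      simp only [pvFpre, if_neg h0]
      have hbs : j + 1 - (j + 1) % wn = j - j % wn := by
        have : j % wn ≤ j := Nat.mod_le _ _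
        omega
      rw [hbs]
      exact pvMaxSeg_snoc (ih (by omega)) hj

def pvFsufAux (tl : List Int) (wn n : Nat) : Nat → Int
  | 0 => tl.getD (n - 1) 0
  | d + 1 => if (n - 1 - d) % wn = 0 then tl.getD (n - 2 - d) 0
             else max (pvFsufAux tl wn n d) (tl.getD (n - 2 - d) 0)

-- pvFsufAux d is the max of labels[j .. min(j - j%wn + wn - 1, n-1)] for j = n-1-d
theorem pvFsufAux_spec (tl : List Int) (wn : Nat) (hw : 1 ≤ wn) :
    ∀ d, d < tl.length →
      pvMaxSeg tl (tl.length - 1 - d)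
        (min ((tl.length - 1 - d) - (tl.length - 1 - d) % wn + wn - 1) (tl.length - 1))
        (pvFsufAux tl wn tl.length d) := by
  intro d
  induction d with
  | zero =>
    intro hd
    simp only [Nat.sub_zero]
    have hb : min ((tl.length - 1) - (tl.length - 1) % wn + wn - 1) (tl.length - 1)
        = tl.length - 1 := by
      have : (tl.length - 1) % wn < wn := Nat.mod_lt _ (by omega)
      have : (tl.length - 1) % wn ≤ tl.length - 1 := Nat.mod_le _ _
      omega
    rw [hb]
    exact pvMaxSeg_single (by omega)
  | succ d ih =>
    intro hd
    set n := tl.length with hn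
    have hj : n - 1 - (d + 1) = n - 2 - d := by omega
    by_cases h0 : (n - 1 - d) % wn = 0
    · -- j+1 is a block start, so j ends its block: segment is the singleton {j}
      have hjs : (n - 2 - d) + 1 = n - 1 - d := by omega
      have hmj : (n - 2 - d) % wn = wn - 1 := pv_mod_succ_zero hw (by rw [hjs]; exact h0)
      simp only [pvFsufAux, h0, if_true]
      rw [hj, hmj]
      have hb : min (n - 2 - d - (wn - 1) + wn - 1) (n - 1) = n - 2 - d := by
        have : (n - 2 - d) % wn ≤ n - 2 - d := Nat.mod_le _ _
        omega
      rw [hb]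
      exact pvMaxSeg_single (by omega)
    · have hjs : (n - 2 - d) + 1 = n - 1 - d := by omega
      have hmj : (n - 1 - d) % wn = (n - 2 - d) % wn + 1 := by
        rw [← hjs]; exact pv_mod_succ hw (by rw [hjs]; exact h0)
      simp only [pvFsufAux, h0, if_false]
      rw [hj]
      have hbe : min ((n - 2 - d) - (n - 2 - d) % wn + wn - 1) (n - 1)
          = min ((n - 1 - d) - (n - 1 - d) % wn + wn - 1) (n - 1) := by
        have h1 : (n - 2 - d) % wn ≤ n - 2 - d := Nat.mod_le _ _
        omega
      rw [hbe]
      have hih := ih (by omega)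
      have hjb : (n - 2 - d) + 1 ≤ min ((n - 1 - d) - (n - 1 - d) % wn + wn - 1) (n - 1) := by
        have h2 : (n - 1 - d) % wn < wn := Nat.mod_lt _ (by omega)
        have h3 : (n - 1 - d) % wn ≤ n - 1 - d := Nat.mod_le _ _
        omega
      have := pvMaxSeg_cons (by rw [hjs]; exact hih) (by omega) hjb
      exact this

theorem pv_emod (wn a : Nat) (hw : 1 ≤ wn) :
    (a + wn - 1) % wn = if a % wn = 0 then wn - 1 else a % wn - 1 := by
  have hr : a % wn < wn := Nat.mod_lt _ (by omega)
  have hd := Nat.div_add_mod a wn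
  by_cases h0 : a % wn = 0
  · rw [if_pos h0]
    have he : a + wn - 1 = wn * (a / wn) + (wn - 1) := by omega
    rw [he, Nat.mul_add_mod, Nat.mod_eq_of_lt (by omega)]
  · rw [if_neg h0]
    have he : a + wn - 1 = wn * (a / wn + 1) + (a % wn - 1) := by
      have : wn * (a / wn + 1) = wn * (a / wn) + wn := by ring
      omega
    rw [he, Nat.mul_add_mod, Nat.mod_eq_of_lt (by omega)]

theorem pv_combine {tl : List Int} {wn a : Nat} {vS vP : Int} (hw : 1 ≤ wn)
    (_hn : a + wn ≤ tl.length)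
    (hS : pvMaxSeg tl a (min ((a - a % wn) + wn - 1) (tl.length - 1)) vS)
    (hP : pvMaxSeg tl ((a + wn - 1) - (a + wn - 1) % wn) (a + wn - 1) vP) :
    pvMaxSeg tl a (a + wn - 1) (max vS vP) := by
  have hra : a % wn < wn := Nat.mod_lt _ (by omega)
  have hla : a % wn ≤ a := Nat.mod_le _ _
  have hre : (a + wn - 1) % wn < wn := Nat.mod_lt _ (by omega)
  have hem := pv_emod wn a hw
  -- block-start of the window's last index lies inside the window, at most one block above a's
  have hkey1 : a ≤ (a + wn - 1) - (a + wn - 1) % wn := by split_ifs at hem <;> omega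
  have hkey2 : (a + wn - 1) - (a + wn - 1) % wn ≤ (a - a % wn) + wn := by
    split_ifs at hem <;> omega
  obtain ⟨⟨kS, hSa, hSb, hSn, heS⟩, hubS⟩ := hS
  obtain ⟨⟨kP, hPa, hPb, hPn, heP⟩, hubP⟩ := hP
  constructor
  · rcases max_choice vS vP with hm | hm
    · exact ⟨kS, hSa, by omega, hSn, by omega⟩
    · exact ⟨kP, by omega, hPb, hPn, by omega⟩
  · intro k hka hkb hkn
    rcases Nat.lt_or_ge k ((a + wn - 1) - (a + wn - 1) % wn) with hlt | hge
    · exact le_trans (hubS k hka (by omega) hkn) (le_max_left _ _)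
    · exact le_trans (hubP k hge hkb hkn) (le_max_right _ _)

theorem pv_cast_self (w : Int) (hw : 1 ≤ w) : ((w.toNat : Nat) : Int) = w := by omega

theorem pv_mod_int (w : Int) (hw : 1 ≤ w) (N : Nat) :
    (PySem.Int.mod (N : Int) w = 0) ↔ N % w.toNat = 0 := by
  rw [← pv_cast_self w hw, PySem.Int.mod_natCast]
  exact_mod_cast Iff.rfl

theorem pv_pre_scan (tl : List Int) (w : Int) (hw : 1 ≤ w) (N : Nat) :
    (PySem.List.pyRange 0 (N : Int) 1).foldl
      (fun (acc : List Int × Int) j =>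
        let cur : Int := if PySem.Int.mod j w = 0 then PySem.List.pyGetD tl j 0
                         else max acc.2 (PySem.List.pyGetD tl j 0)
        (acc.1 ++ [cur], cur)) ([], 0)
    = ((List.range N).map (pvFpre tl w.toNat),
        if N = 0 then 0 else pvFpre tl w.toNat (N - 1)) := by
  induction N with
  | zero => rw [Nat.cast_zero, PySem.List.pyRange_one_eq_nil (by omega)]; simp
  | succ N ih =>
    have hc : ((N + 1 : Nat) : Int) = (N : Int) + 1 := by push_cast; ring
    rw [hc, PySem.List.pyRange_one_succ_right (by omega), List.foldl_append, ih]
    simp only [List.foldl_cons, List.foldl_nil, PySem.List.pyGetD_natCast]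
    by_cases h0 : N % w.toNat = 0
    · rw [if_pos ((pv_mod_int w hw N).2 h0)]
      have hf : pvFpre tl w.toNat N = tl.getD N 0 := by
        cases N with
        | zero => simp [pvFpre]
        | succ M => simp [pvFpre, h0]
      rw [List.range_succ, List.map_append]
      simp [hf]
    · rw [if_neg (fun hx => h0 ((pv_mod_int w hw N).1 hx))]
      have hN0 : N ≠ 0 := by
        intro h; apply h0; rw [h]; exact Nat.zero_mod _
      rw [if_neg hN0]
      obtain ⟨M, rfl⟩ : ∃ M, N = M + 1 := ⟨N - 1, by omega⟩
      have hf : pvFpre tl w.toNat (M + 1)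
          = max (pvFpre tl w.toNat M) (tl.getD (M + 1) 0) := by
        simp [pvFpre, h0]
      simp [hf, List.range_succ]

theorem pv_reverse_map_range {F : Nat → Int} {n : Nat} :
    ((List.range n).map F).reverse = (List.range n).map (fun j => F (n - 1 - j)) := by
  apply List.ext_getElem
  · simp
  · intro i h1 h2
    simp only [List.length_reverse, List.length_map, List.length_range] at h1
    rw [List.getElem_reverse]
    simp only [List.getElem_map, List.getElem_range, List.length_map, List.length_range]

theorem pv_suf_scan (tl : List Int) (w : Int) (hw : 1 ≤ w) :
    ∀ N, N ≤ tl.length →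
    ((List.range N).foldl
      (fun (acc : List Int × Int) k =>
        let j : Int := (tl.length : Int) - 1 - (k : Nat)
        let cur : Int := if PySem.Int.mod (j + 1) w = 0 ∨ j = (tl.length : Int) - 1
                         then PySem.List.pyGetD tl j 0
                         else max acc.2 (PySem.List.pyGetD tl j 0)
        (acc.1 ++ [cur], cur)) ([], 0))
    = ((List.range N).map (pvFsufAux tl w.toNat tl.length),
       if N = 0 then 0 else pvFsufAux tl w.toNat tl.length (N - 1)) := by
  intro N
  induction N with
  | zero => simp
  | succ M ih =>
    intro hM
    rw [List.range_succ, List.foldl_append, ih (by omega), List.foldl_cons, List.foldl_nil]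
    set n := tl.length with hdefn
    have hj : (n : Int) - 1 - (M : Nat) = ((n - 1 - M : Nat) : Int) := by omega
    cases M with
    | zero =>
      dsimp only
      simp only [Nat.cast_zero, sub_zero, or_true, if_true]
      have hg0 : PySem.List.pyGetD tl ((n : Int) - 1) 0 = tl.getD (n - 1) 0 := by
        rw [show (n : Int) - 1 = ((n - 1 : Nat) : Int) by omega, PySem.List.pyGetD_natCast]
      rw [hg0]
      simp [pvFsufAux]
    | succ d =>
      dsimp only
      have hjne : ¬((n : Int) - 1 - ((d + 1 : Nat) : Nat) = (n : Int) - 1) := by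
        push_cast; omega
      have hmod : (PySem.Int.mod ((n : Int) - 1 - ((d + 1 : Nat) : Nat) + 1) w = 0)
          ↔ (n - 1 - d) % w.toNat = 0 := by
        rw [show (n : Int) - 1 - ((d + 1 : Nat) : Nat) + 1 = ((n - 1 - d : Nat) : Int) by push_cast; omega]
        exact pv_mod_int w hw _
      have hget : PySem.List.pyGetD tl ((n : Int) - 1 - ((d + 1 : Nat) : Nat)) 0
          = tl.getD (n - 2 - d) 0 := by
        rw [show (n : Int) - 1 - ((d + 1 : Nat) : Nat) = ((n - 2 - d : Nat) : Int) by push_cast; omega,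
          PySem.List.pyGetD_natCast]
      by_cases h0 : (n - 1 - d) % w.toNat = 0
      · rw [if_pos (Or.inl (hmod.2 h0))]
        rw [hget]
        have : pvFsufAux tl w.toNat n (d + 1) = tl.getD (n - 2 - d) 0 := by
          simp [pvFsufAux, h0]
        simp [this, List.range_succ]
      · rw [if_neg (fun hx => hx.elim (fun hx1 => h0 (hmod.1 hx1)) (fun hx2 => hjne hx2))]
        rw [hget]
        have : pvFsufAux tl w.toNat n (d + 1)
            = max (pvFsufAux tl w.toNat n d) (tl.getD (n - 2 - d) 0) := by
          simp [pvFsufAux, h0]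
        simp [this, List.range_succ]

theorem pv_P_scan (md : List Int) : ∀ (acc : List Int) (s : Int),
    (md.foldl (fun (acc : List Int × Int) d => (acc.1 ++ [acc.2 + d], acc.2 + d)) (acc, s)).1
    = acc ++ (List.range md.length).map (fun k => s + (md.take (k + 1)).sum) := by
  induction md with
  | nil => intro acc s; simp
  | cons d rest ih =>
    intro acc s
    rw [List.foldl_cons, ih]
    simp only [List.length_cons]
    rw [List.range_succ_eq_map]
    simp only [List.map_cons, List.map_map]
    simp [List.sum_cons, Function.comp, add_assoc]

theorem pv_P_getD (md : List Int) (k : Nat) (hk : k ≤ md.length) :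
    ((md.foldl (fun (acc : List Int × Int) d => (acc.1 ++ [acc.2 + d], acc.2 + d)) ([0], 0)).1).getD k 0
    = (md.take k).sum := by
  rw [pv_P_scan]
  cases k with
  | zero => simp
  | succ k' =>
    have hk' : k' < md.length := by omega
    rw [List.getD_eq_getElem]
    · simp [List.getElem_map, List.getElem_range, hk']
    · simp; omega

theorem pv_sum_diff (md : List Int) (a b : Nat) (hab : a ≤ b) :
    ((md.drop a).take (b - a)).sum = (md.take b).sum - (md.take a).sum := by
  have h := List.take_add (l := md) (i := a) (j := b - a)
  rw [show a + (b - a) = b by omega] at h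
  rw [h, List.sum_append]
  ring

def pvTrueA (tl : List Int) (w : Int) (i : Int) : Int :=
  match PySem.List.max? (PySem.List.slice tl (some i) (some (i + w))) (fun y => y) with
  | some v => v
  | none => 0

def pvModelA (md : List Int) (w ct : Int) (i : Int) : Int :=
  if i < 21 then
    if (PySem.List.slice md none (some (i + w - 21))).sum > ct then 1 else 0
  else
    if (PySem.List.slice md (some (i - 21)) (some (min (i + w - 21) (md.length : Int)))).sum > ct then 1 else 0

def pvPreFold (tl : List Int) (w : Int) : List Int × Int :=
  (PySem.List.pyRange 0 (tl.length : Int) 1).foldl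
    (fun (acc : List Int × Int) j =>
      let cur : Int := if PySem.Int.mod j w = 0 then PySem.List.pyGetD tl j 0
                       else max acc.2 (PySem.List.pyGetD tl j 0)
      (acc.1 ++ [cur], cur)) ([], 0)

def pvSufFold (tl : List Int) (w : Int) : List Int × Int :=
  (PySem.List.pyRange ((tl.length : Int) - 1) (-1) (-1)).foldl
    (fun (acc : List Int × Int) j =>
      let cur : Int := if PySem.Int.mod (j + 1) w = 0 ∨ j = (tl.length : Int) - 1
                       then PySem.List.pyGetD tl j 0
                       else max acc.2 (PySem.List.pyGetD tl j 0)
      (acc.1 ++ [cur], cur)) ([], 0)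

def pvPFold (md : List Int) : List Int × Int :=
  md.foldl (fun (acc : List Int × Int) d => (acc.1 ++ [acc.2 + d], acc.2 + d)) ([0], 0)

def pvTrueB (tl : List Int) (w : Int) (i : Int) : Int :=
  max (PySem.List.pyGetD ((pvSufFold tl w).1.reverse) i 0)
      (PySem.List.pyGetD (pvPreFold tl w).1 (i + w - 1) 0)

def pvModelB (md : List Int) (w ct : Int) (i : Int) : Int :=
  let m : Int := md.length
  let clamp : Int → Int := fun t =>
    let t' := if t < 0 then t + m else t
    if t' < 0 then 0 else if t' > m then m else t'
  let lohi : Int × Int := if i < 21 then ((0 : Int), clamp (i + w - 21))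
                          else (min (i - 21) m, min (i + w - 21) m)
  if PySem.List.pyGetD (pvPFold md).1 lohi.2 0 - PySem.List.pyGetD (pvPFold md).1 lohi.1 0 > ct then 1 else 0

theorem pv_countdown (n : Nat) :
    PySem.List.pyRange ((n : Int) - 1) (-1) (-1)
    = (List.range n).map (fun k => (n : Int) - 1 - (k : Nat)) := by
  rw [PySem.List.pyRange_neg_one]
  have h : ((n : Int) - 1 - -1).toNat = n := by omega
  rw [h]

theorem pv_preFold_eq (tl : List Int) (w : Int) (hw : 1 ≤ w) :
    (pvPreFold tl w).1 = (List.range tl.length).map (pvFpre tl w.toNat) :=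
  Eq.trans (congrArg Prod.fst (pv_pre_scan tl w hw tl.length)) rfl

theorem pv_sufFold_eq (tl : List Int) (w : Int) (hw : 1 ≤ w) :
    (pvSufFold tl w).1.reverse
    = (List.range tl.length).map (fun j => pvFsufAux tl w.toNat tl.length (tl.length - 1 - j)) := by
  have h1 : (pvSufFold tl w).1 = (List.range tl.length).map (pvFsufAux tl w.toNat tl.length) := by
    unfold pvSufFold
    rw [pv_countdown tl.length, List.foldl_map]
    exact Eq.trans (congrArg Prod.fst (pv_suf_scan tl w hw tl.length le_rfl)) rfl
  rw [h1, pv_reverse_map_range]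

theorem pv_PFold_getD (md : List Int) (k : Nat) (hk : k ≤ md.length) :
    ((pvPFold md).1).getD k 0 = (md.take k).sum :=
  pv_P_getD md k hk

theorem pv_foldl_pair {α : Type} (l : List α) (f g : α → Int) (A0 B0 : List Int) :
    l.foldl (fun (acc : List Int × List Int) i => (acc.1 ++ [f i], acc.2 ++ [g i])) (A0, B0)
    = (A0 ++ l.map f, B0 ++ l.map g) := by
  induction l generalizing A0 B0 with
  | nil => simp
  | cons x t ih => simp [ih]

theorem pv_true_pt (tl : List Int) (w : Int) (hw : 1 ≤ w) (i : Int)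
    (h0 : 0 ≤ i) (h1 : i < (tl.length : Int) - w + 1) :
    pvTrueA tl w i = pvTrueB tl w i := by
  have hwn : 1 ≤ w.toNat := by omega
  have hn : 1 ≤ tl.length := by omega
  have han : i.toNat + w.toNat ≤ tl.length := by omega
  set n := tl.length with hdefn
  set wn := w.toNat with hdefwn
  set a := i.toNat with hdefa
  -- the window slice
  have hsl : PySem.List.slice tl (some i) (some (i + w)) = (tl.drop a).take wn := by
    rw [PySem.List.slice_toNat tl h0 (by omega)]
    congr 1
    omega
  have hne : (tl.drop a).take wn ≠ [] := by
    intro hx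
    have := congrArg List.length hx
    simp [List.length_take, List.length_drop] at this
    omega
  obtain ⟨v, hv, hmem, hub⟩ := pv_max_char _ hne
  have hA : pvMaxSeg tl a (a + wn - 1) v := by
    constructor
    · obtain ⟨k, hka, hkm, hkn, he⟩ := pv_mem_drop_take.1 hmem
      exact ⟨k, hka, by omega, hkn, he⟩
    · intro k hka hkb hkn
      exact hub _ (pv_mem_drop_take.2 ⟨k, hka, by omega, hkn, rfl⟩)
  -- B's value
  have hgs : PySem.List.pyGetD ((pvSufFold tl w).1.reverse) i 0
      = pvFsufAux tl wn n (n - 1 - a) := by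
    rw [pv_sufFold_eq tl w hw, show i = ((a : Nat) : Int) by omega, PySem.List.pyGetD_natCast]
    rw [List.getD_eq_getElem _ _ (by simp; omega)]
    simp
    rfl
  have hgp : PySem.List.pyGetD (pvPreFold tl w).1 (i + w - 1) 0
      = pvFpre tl wn (a + wn - 1) := by
    rw [pv_preFold_eq tl w hw, show i + w - 1 = ((a + wn - 1 : Nat) : Int) by omega,
      PySem.List.pyGetD_natCast]
    rw [List.getD_eq_getElem _ _ (by simp; omega)]
    simp
    rfl
  have hS0 := pvFsufAux_spec tl wn hwn (n - 1 - a) (by omega)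
  have hP0 := pvFpre_spec tl wn hwn (a + wn - 1) (by omega)
  have hSa : n - 1 - (n - 1 - a) = a := by omega
  rw [hSa] at hS0
  have hB : pvMaxSeg tl a (a + wn - 1)
      (max (pvFsufAux tl wn n (n - 1 - a)) (pvFpre tl wn (a + wn - 1))) :=
    pv_combine hwn han hS0 hP0
  have : pvTrueB tl w i
      = max (pvFsufAux tl wn n (n - 1 - a)) (pvFpre tl wn (a + wn - 1)) := by
    unfold pvTrueB
    rw [hgs, hgp]
  rw [this]
  have hAv : pvTrueA tl w i = v := by
    unfold pvTrueA
    rw [hsl, hv]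
  rw [hAv]
  exact pvMaxSeg_unique hA hB

theorem pv_model_pt (md : List Int) (w ct : Int) (hw : 1 ≤ w) (i : Int) (_h0 : 0 ≤ i) :
    pvModelA md w ct i = pvModelB md w ct i := by
  have hPg : ∀ h : Int, 0 ≤ h → h ≤ (md.length : Int) →
      PySem.List.pyGetD (pvPFold md).1 h 0 = (md.take h.toNat).sum := by
    intro h hh0 hh1
    rw [show h = ((h.toNat : Nat) : Int) by omega, PySem.List.pyGetD_natCast]
    exact pv_PFold_getD md h.toNat (by omega)
  have hP0 : PySem.List.pyGetD (pvPFold md).1 0 0 = 0 := by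
    rw [hPg 0 le_rfl (by omega)]; simp
  unfold pvModelA pvModelB
  dsimp only
  by_cases hlt : i < 21
  · rw [if_pos hlt, if_pos hlt]
    dsimp only
    rw [hP0, sub_zero]
    by_cases hs0 : i + w - 21 < 0
    · rw [if_pos hs0]
      have hk : PySem.List.slice md none (some (i + w - 21)) = md.take (md.length - (-(i + w - 21)).toNat) := by
        conv_lhs => rw [show i + w - 21 = -(((-(i + w - 21)).toNat : Nat) : Int) by omega]
        exact PySem.List.slice_to_neg_natCast md (-(i + w - 21)).toNat (by omega)
      rw [hk]
      by_cases hs1 : i + w - 21 + (md.length : Int) < 0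
      · rw [if_pos hs1, hP0, show md.length - (-(i + w - 21)).toNat = 0 by omega]
        simp
      · rw [if_neg hs1, if_neg (show ¬ (i + w - 21 + (md.length : Int) > (md.length : Int)) by omega)]
        rw [hPg (i + w - 21 + (md.length : Int)) (by omega) (by omega),
          show (i + w - 21 + (md.length : Int)).toNat = md.length - (-(i + w - 21)).toNat by omega]
    · rw [if_neg hs0, if_neg hs0]
      rw [PySem.List.slice_to md (by omega)]
      by_cases hs2 : i + w - 21 > (md.length : Int)
      · rw [if_pos hs2]
        rw [hPg (md.length : Int) (by omega) le_rfl, show ((md.length : Int)).toNat = md.length by omega]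
        rw [List.take_of_length_le (l := md) (by omega), List.take_length]
      · rw [if_neg hs2]
        rw [hPg (i + w - 21) (by omega) (by omega)]
  · rw [if_neg hlt, if_neg hlt]
    dsimp only
    have hge : (21 : Int) ≤ i := by omega
    have hb00 : 0 ≤ min (i + w - 21) (md.length : Int) := by
      apply le_min <;> omega
    have hb0m : min (i + w - 21) (md.length : Int) ≤ (md.length : Int) := min_le_right _ _
    rw [PySem.List.slice_toNat md (by omega) hb00]
    by_cases ham : i - 21 ≤ (md.length : Int)
    · have hab : i - 21 ≤ min (i + w - 21) (md.length : Int) := by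
        apply le_min <;> omega
      rw [min_eq_left ham]
      rw [hPg (min (i + w - 21) (md.length : Int)) hb00 hb0m, hPg (i - 21) (by omega) ham]
      rw [pv_sum_diff md (i - 21).toNat (min (i + w - 21) (md.length : Int)).toNat (by omega)]
    · have hb0m' : min (i + w - 21) (md.length : Int) = (md.length : Int) := by
        apply min_eq_right
        omega
      rw [min_eq_right (by omega : (md.length : Int) ≤ i - 21)]
      rw [List.drop_eq_nil_of_le (by omega : md.length ≤ (i - 21).toNat)]
      rw [hPg (min (i + w - 21) (md.length : Int)) hb00 hb0m, hPg (md.length : Int) (by omega) le_rfl, hb0m']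
      simp

theorem pv_main (model_detections true_labels : List Int) (window_size count_threshold : Int)
    (hw : 1 ≤ window_size) :
    LSTM_preds_to_window_preds model_detections true_labels window_size count_threshold
    = LSTM_preds_to_window_preds_alt model_detections true_labels window_size count_threshold := by
  show (PySem.List.pyRange 0 ((true_labels.length : Int) - window_size + 1) 1).foldl
      (fun (acc : List Int × List Int) i =>
        (acc.1 ++ [pvTrueA true_labels window_size i],
         acc.2 ++ [pvModelA model_detections window_size count_threshold i])) ([], [])
    = if (true_labels.length : Int) - window_size + 1 ≤ 0 then ([], [])
      else
        ((PySem.List.pyRange 0 ((true_labels.length : Int) - window_size + 1) 1).map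
           (fun i => pvTrueB true_labels window_size i),
         (PySem.List.pyRange 0 ((true_labels.length : Int) - window_size + 1) 1).map
           (fun i => pvModelB model_detections window_size count_threshold i))
  by_cases hnum : (true_labels.length : Int) - window_size + 1 ≤ 0
  · rw [if_pos hnum, PySem.List.pyRange_one_eq_nil (by omega)]
    rfl
  · rw [if_neg hnum,
      pv_foldl_pair (PySem.List.pyRange 0 ((true_labels.length : Int) - window_size + 1) 1)
        (fun i => pvTrueA true_labels window_size i)
        (fun i => pvModelA model_detections window_size count_threshold i) [] []]
    simp only [List.nil_append]
    refine congrArg₂ Prod.mk ?_ ?_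
    · apply List.map_congr_left
      intro i hi
      obtain ⟨hi0, hi1⟩ := PySem.List.mem_pyRange_one.1 hi
      exact pv_true_pt true_labels window_size hw i hi0 hi1
    · apply List.map_congr_left
      intro i hi
      obtain ⟨hi0, _⟩ := PySem.List.mem_pyRange_one.1 hi
      exact pv_model_pt model_detections window_size count_threshold hw i hi0

-- ===== VERDICT (by name: the statement is the Claim_ definition above) =====
theorem LSTM_preds_to_window_preds_spec : Claim_equal_LSTM_preds_to_window_preds := by
  intro model_detections true_labels window_size count_threshold _ hpre
  unfold Spec_LSTM_preds_to_window_preds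
  exact pv_main model_detections true_labels window_size count_threshold hpre
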